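-- pv_equiv track=rewrite | github.com/walkccc/LeetCode | solutions/1989. Maximum Number of People That Can Be Caught in Tag/1989.py | catchMaximumAmountofPeople
-- ===== SOURCE A (Python) =====
-- from typing import List
--
-- def catchMaximumAmountofPeople(team: List[int], dist: int) -> int:
--   ans = 0
--   i = 0  # 0s index
--   j = 0  # 1s index
--
--   while i < len(team) and j < len(team):
--     if i + dist < j or team[i] != 0:
--       # Find the next 0 that can be caught by 1.
--       i += 1
--     elif j + dist < i or team[j] != 1:
--       # Find the next 1 that can catch 0.
--       j += 1
--     else:
--       # team[j] catches team[i], so move both.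
--       ans += 1
--       i += 1
--       j += 1
--
--   return ans
-- ===== SOURCE B (Python) =====
-- from typing import List
--
-- def catchMaximumAmountofPeople(team: List[int], dist: int) -> int:
--   # One online left-to-right pass: keep queues of still-unmatched people (0s)
--   # and taggers (1s) seen so far; expire lazily, match greedily with the queue front.
--   ans = 0
--   pending0 = []  # positions of people seen so far with no tagger yet
--   pending1 = []  # positions of taggers seen so far with no person yet
--   for k, t in enumerate(team):
--     if t == 0:
--       while pending1 and pending1[0] + dist < k:
--         pending1.pop(0)
--       if pending1:
--         pending1.pop(0)
--         ans += 1
--       else: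
--         pending0.append(k)
--     elif t == 1:
--       while pending0 and pending0[0] + dist < k:
--         pending0.pop(0)
--       if pending0:
--         pending0.pop(0)
--         ans += 1
--       else:
--         pending1.append(k)
--   return ans
-- ===== Notes on version B (the rewrite author's own statement) =====
-- stated objective: alternative
-- what changed: B makes a single online left-to-right pass over the array, maintaining queues of pending unmatched people and taggers with lazy expiry of out-of-range fronts, instead of A's two independent index pointers that each re-scan the same array interleaved inside one while loop.
import Mathlib
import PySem

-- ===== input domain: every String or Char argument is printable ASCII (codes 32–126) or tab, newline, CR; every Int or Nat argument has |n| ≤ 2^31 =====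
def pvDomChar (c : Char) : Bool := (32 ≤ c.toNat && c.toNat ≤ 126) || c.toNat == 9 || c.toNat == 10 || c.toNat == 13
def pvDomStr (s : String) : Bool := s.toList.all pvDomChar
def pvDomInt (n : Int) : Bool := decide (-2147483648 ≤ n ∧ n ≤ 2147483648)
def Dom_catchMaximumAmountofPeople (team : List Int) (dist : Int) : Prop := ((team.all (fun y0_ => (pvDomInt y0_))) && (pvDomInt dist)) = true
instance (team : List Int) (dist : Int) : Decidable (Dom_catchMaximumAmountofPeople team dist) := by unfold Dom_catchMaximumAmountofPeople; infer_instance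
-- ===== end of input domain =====

-- B replaces A's interleaved two-index scan by a single online pass over the array
-- keeping queues of pending unmatched people/taggers with lazy expiry (alternative; same cost).

-- ===== PORT A =====
-- A's while loop: i scans for 0s, j scans for 1s over the same array.
def catchLoopA (team : List Int) (dist : Int) (i j : Nat) : Int :=
  if h : i < team.length ∧ j < team.length then
    if (i : Int) + dist < (j : Int) ∨ team[i]'h.1 ≠ 0 then
      catchLoopA team dist (i + 1) j
    else if (j : Int) + dist < (i : Int) ∨ team[j]'h.2 ≠ 1 then
      catchLoopA team dist i (j + 1)
    else
      1 + catchLoopA team dist (i + 1) (j + 1)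
  else 0
termination_by (team.length - i) + (team.length - j)
decreasing_by all_goals omega

def catchMaximumAmountofPeople (team : List Int) (dist : Int) : Int :=
  catchLoopA team dist 0 0

-- ===== PORT B =====
-- Source B's for-loop over team: k is the current index, p0/p1 the pending queues;
-- the inner while loop popping expired fronts is List.dropWhile.
def onePassB (dist : Int) : List Int → Int → List Int → List Int → Int
  | [], _, _, _ => 0
  | t :: rest, k, p0, p1 =>
    if t = 0 then
      match p1.dropWhile (fun o => decide (o + dist < k)) with
      | _ :: q => 1 + onePassB dist rest (k + 1) p0 q
      | [] => onePassB dist rest (k + 1) (p0 ++ [k]) []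
    else if t = 1 then
      match p0.dropWhile (fun z => decide (z + dist < k)) with
      | _ :: q => 1 + onePassB dist rest (k + 1) q p1
      | [] => onePassB dist rest (k + 1) [] (p1 ++ [k])
    else onePassB dist rest (k + 1) p0 p1

def catchMaximumAmountofPeople_alt (team : List Int) (dist : Int) : Int :=
  onePassB dist team 0 [] []

-- ===== PRECONDITION & SPEC =====
def Spec_catchMaximumAmountofPeople (team : List Int) (dist : Int) (out : Int) : Prop := out = catchMaximumAmountofPeople_alt team dist
instance (team : List Int) (dist : Int) (out : Int) : Decidable (Spec_catchMaximumAmountofPeople team dist out) := by unfold Spec_catchMaximumAmountofPeople; infer_instance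

-- ===== CLAIM (what is proved, stated in full; the proofs are below) =====
def Claim_equal_catchMaximumAmountofPeople : Prop := ∀ (team : List Int) (dist : Int), Dom_catchMaximumAmountofPeople team dist → Spec_catchMaximumAmountofPeople team dist (catchMaximumAmountofPeople team dist)

-- ===== LEMMAS AND PROOFS =====

-- proof-side normal form: greedy two-pointer merge over the two position lists
def twoPtr (dist : Int) (zs os : List Int) : Int :=
  match zs, os with
  | z :: zs', o :: os' =>
    if z + dist < o then twoPtr dist zs' (o :: os')
    else if o + dist < z then twoPtr dist (z :: zs') os'
    else 1 + twoPtr dist zs' os'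
  | _, _ => 0
termination_by zs.length + os.length

-- positions k ≥ i with team[k] = v, as Ints, in increasing order
def posFrom (team : List Int) (v : Int) (i : Nat) : List Int :=
  if h : i < team.length then
    if team[i] = v then (i : Int) :: posFrom team v (i + 1) else posFrom team v (i + 1)
  else []
termination_by team.length - i
decreasing_by all_goals omega

lemma posFrom_nil (team : List Int) (v : Int) {i : Nat} (h : ¬ i < team.length) :
    posFrom team v i = [] := by rw [posFrom, dif_neg h]

lemma posFrom_lt (team : List Int) (v : Int) {i : Nat} (h : i < team.length) :
    posFrom team v i =
      if team[i] = v then (i : Int) :: posFrom team v (i + 1) else posFrom team v (i + 1) := by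
  rw [posFrom, dif_pos h]

lemma posFrom_ge (team : List Int) (v : Int) :
    ∀ (n i : Nat) (k : Int), team.length - i ≤ n → k ∈ posFrom team v i → (i : Int) ≤ k := by
  intro n
  induction n with
  | zero =>
    intro i k hn hk
    rw [posFrom_nil team v (by omega)] at hk
    exact absurd hk (List.not_mem_nil)
  | succ n ih =>
    intro i k hn hk
    by_cases h : i < team.length
    · rw [posFrom_lt team v h] at hk
      split_ifs at hk with hv
      · rcases List.mem_cons.mp hk with rfl | hk
        · omega
        · have := ih (i + 1) k (by omega) hk; push_cast at this ⊢; omega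
      · have := ih (i + 1) k (by omega) hk; push_cast at this ⊢; omega
    · rw [posFrom_nil team v h] at hk
      exact absurd hk (List.not_mem_nil)

lemma twoPtr_nil_right (dist : Int) (zs : List Int) : twoPtr dist zs [] = 0 := by
  rw [twoPtr.eq_def]; split <;> simp_all

lemma twoPtr_nil_left (dist : Int) (os : List Int) : twoPtr dist [] os = 0 := by
  rw [twoPtr.eq_def]

lemma twoPtr_cons (dist z o : Int) (zs os : List Int) :
    twoPtr dist (z :: zs) (o :: os) =
      if z + dist < o then twoPtr dist zs (o :: os)
      else if o + dist < z then twoPtr dist (z :: zs) os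
      else 1 + twoPtr dist zs os := by
  rw [twoPtr.eq_def]

-- A's interleaved scan equals the two-pointer merge over the position lists
lemma main_lemma (team : List Int) (dist : Int) :
    ∀ (n i j : Nat), (team.length - i) + (team.length - j) ≤ n →
      catchLoopA team dist i j = twoPtr dist (posFrom team 0 i) (posFrom team 1 j) := by
  intro n
  induction n with
  | zero =>
    intro i j hn
    have hi : ¬ i < team.length := by omega
    rw [catchLoopA, dif_neg (by omega), posFrom_nil team 0 hi, twoPtr_nil_left]
  | succ n ih =>
    intro i j hn
    by_cases h : i < team.length ∧ j < team.length
    · rw [catchLoopA, dif_pos h]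
      by_cases hti : team[i]'h.1 = 0
      · by_cases hlt : (i : Int) + dist < (j : Int)
        · rw [if_pos (Or.inl hlt), posFrom_lt team 0 h.1, if_pos hti,
            ih (i + 1) j (by omega)]
          cases hos : posFrom team 1 j with
          | nil => rw [twoPtr_nil_right, twoPtr_nil_right]
          | cons o os' =>
            have ho : (j : Int) ≤ o :=
              posFrom_ge team 1 (team.length - j) j o (le_refl _) (hos ▸ List.mem_cons_self)
            rw [twoPtr_cons, if_pos (by omega)]
        · by_cases htj : team[j]'h.2 = 1
          · by_cases hjt : (j : Int) + dist < (i : Int)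
            · rw [if_neg (by simp [hti, hlt]), if_pos (Or.inl hjt),
                posFrom_lt team 0 h.1, if_pos hti, posFrom_lt team 1 h.2, if_pos htj,
                twoPtr_cons, if_neg (by omega), if_pos (by omega),
                ih i (j + 1) (by omega), posFrom_lt team 0 h.1, if_pos hti]
            · rw [if_neg (by simp [hti, hlt]), if_neg (by simp [htj, hjt]),
                posFrom_lt team 0 h.1, if_pos hti, posFrom_lt team 1 h.2, if_pos htj,
                twoPtr_cons, if_neg (by omega), if_neg (by omega),
                ih (i + 1) (j + 1) (by omega)]
          · rw [if_neg (by simp [hti, hlt]), if_pos (Or.inr htj),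
              posFrom_lt team 1 h.2, if_neg htj, ih i (j + 1) (by omega)]
      · rw [if_pos (Or.inr hti), posFrom_lt team 0 h.1, if_neg hti,
          ih (i + 1) j (by omega)]
    · rw [catchLoopA, dif_neg h]
      rcases not_and_or.mp h with hi | hj
      · rw [posFrom_nil team 0 hi, twoPtr_nil_left]
      · rw [posFrom_nil team 1 hj, twoPtr_nil_right]

-- B-side: expiring the front of the pending-ones queue aligns with twoPtr steps
lemma drop_ones (dist k : Int) (hd : 0 ≤ dist) :
    ∀ (p1 Z O : List Int), (∀ x ∈ p1, x < k) →
      twoPtr dist (k :: Z) (p1 ++ O) =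
        (match p1.dropWhile (fun o => decide (o + dist < k)) with
         | _ :: q => 1 + twoPtr dist Z (q ++ O)
         | [] => twoPtr dist (k :: Z) O) := by
  intro p1
  induction p1 with
  | nil => intro Z O _; simp
  | cons o p1' ih =>
    intro Z O hlt
    have ho : o < k := hlt o List.mem_cons_self
    by_cases hexp : o + dist < k
    · rw [List.cons_append, twoPtr_cons, if_neg (by omega), if_pos hexp,
        List.dropWhile_cons_of_pos (by simpa using hexp)]
      exact ih Z O (fun x hx => hlt x (List.mem_cons_of_mem _ hx))
    · rw [List.cons_append, twoPtr_cons, if_neg (by omega), if_neg hexp,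
        List.dropWhile_cons_of_neg (by simpa using hexp)]

-- symmetric: expiring the front of the pending-zeros queue
lemma drop_zeros (dist k : Int) (hd : 0 ≤ dist) :
    ∀ (p0 Z O : List Int), (∀ x ∈ p0, x < k) →
      twoPtr dist (p0 ++ Z) (k :: O) =
        (match p0.dropWhile (fun z => decide (z + dist < k)) with
         | _ :: q => 1 + twoPtr dist (q ++ Z) O
         | [] => twoPtr dist Z (k :: O)) := by
  intro p0
  induction p0 with
  | nil => intro Z O _; simp
  | cons z p0' ih =>
    intro Z O hlt
    have hz : z < k := hlt z List.mem_cons_self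
    by_cases hexp : z + dist < k
    · rw [List.cons_append, twoPtr_cons, if_pos hexp,
        List.dropWhile_cons_of_pos (by simpa using hexp)]
      exact ih Z O (fun x hx => hlt x (List.mem_cons_of_mem _ hx))
    · rw [List.cons_append, twoPtr_cons, if_neg hexp, if_neg (by omega),
        List.dropWhile_cons_of_neg (by simpa using hexp)]

-- B's online pass equals the two-pointer merge, for dist ≥ 0
lemma onePass_eq (team : List Int) (dist : Int) (hd : 0 ≤ dist) :
    ∀ (n i : Nat) (p0 p1 : List Int), team.length - i ≤ n →
      (∀ x ∈ p0, x < (i : Int)) → (∀ x ∈ p1, x < (i : Int)) → (p0 = [] ∨ p1 = []) →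
      onePassB dist (team.drop i) (i : Int) p0 p1 =
        twoPtr dist (p0 ++ posFrom team 0 i) (p1 ++ posFrom team 1 i) := by
  intro n
  induction n with
  | zero =>
    intro i p0 p1 hn h0 h1 hor
    rw [List.drop_eq_nil_of_le (by omega), posFrom_nil team 0 (by omega),
      posFrom_nil team 1 (by omega), List.append_nil, List.append_nil]
    rcases hor with rfl | rfl
    · rw [twoPtr_nil_left]; rfl
    · rw [twoPtr_nil_right]; rfl
  | succ n ih =>
    intro i p0 p1 hn h0 h1 hor
    by_cases h : i < team.length
    · rw [List.drop_eq_getElem_cons h]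
      have hc : (i : Int) + 1 = ((i + 1 : Nat) : Int) := by push_cast; ring
      by_cases ht0 : team[i] = 0
      · rw [posFrom_lt team 0 h, if_pos ht0, posFrom_lt team 1 h, if_neg (by omega)]
        rcases hor with rfl | rfl
        · -- p0 empty: zeros list starts with i; align the expiry loop
          simp only [List.nil_append]
          rw [drop_ones dist (i : Int) hd p1 (posFrom team 0 (i + 1)) (posFrom team 1 (i + 1)) h1]
          simp only [onePassB, if_pos ht0]
          cases hdw : p1.dropWhile (fun o => decide (o + dist < (i : Int))) with
          | cons o q =>
            dsimp only
            have hq : ∀ x ∈ q, x < ((i + 1 : Nat) : Int) := by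
              intro x hx
              have : x ∈ p1 := (List.dropWhile_sublist _).subset (hdw ▸ List.mem_cons_of_mem _ hx)
              have := h1 x this; push_cast; omega
            rw [hc, ih (i + 1) [] q (by omega) (by simp) hq (Or.inl rfl)]
            simp
          | nil =>
            simp only [List.nil_append]
            rw [hc, ih (i + 1) [(i : Int)] [] (by omega)
              (by intro x hx; simp at hx; push_cast; omega) (by simp) (Or.inr rfl)]
            simp
        · -- p1 empty: just append i to the pending zeros
          simp only [onePassB, if_pos ht0, List.dropWhile_nil, List.nil_append]
          rw [hc, ih (i + 1) (p0 ++ [(i : Int)]) [] (by omega)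
            (by intro x hx; rcases List.mem_append.mp hx with hx | hx
                · have := h0 x hx; push_cast; omega
                · simp at hx; push_cast; omega)
            (by simp) (Or.inr rfl)]
          simp
      · by_cases ht1 : team[i] = 1
        · rw [posFrom_lt team 0 h, if_neg ht0, posFrom_lt team 1 h, if_pos ht1]
          rcases hor with rfl | rfl
          · -- p0 empty: just append i to the pending ones
            simp only [onePassB, if_neg ht0, if_pos ht1, List.dropWhile_nil, List.nil_append]
            rw [hc, ih (i + 1) [] (p1 ++ [(i : Int)]) (by omega) (by simp)
              (by intro x hx; rcases List.mem_append.mp hx with hx | hx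
                  · have := h1 x hx; push_cast; omega
                  · simp at hx; push_cast; omega)
              (Or.inl rfl)]
            simp
          · -- p1 empty: ones list starts with i; align the expiry loop
            simp only [List.nil_append]
            rw [drop_zeros dist (i : Int) hd p0 (posFrom team 0 (i + 1)) (posFrom team 1 (i + 1)) h0]
            simp only [onePassB, if_neg ht0, if_pos ht1]
            cases hdw : p0.dropWhile (fun z => decide (z + dist < (i : Int))) with
            | cons z q =>
              dsimp only
              have hq : ∀ x ∈ q, x < ((i + 1 : Nat) : Int) := by
                intro x hx
                have : x ∈ p0 := (List.dropWhile_sublist _).subset (hdw ▸ List.mem_cons_of_mem _ hx)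
                have := h0 x this; push_cast; omega
              rw [hc, ih (i + 1) q [] (by omega) hq (by simp) (Or.inr rfl)]
              simp
            | nil =>
              simp only [List.nil_append]
              rw [hc, ih (i + 1) [] [(i : Int)] (by omega) (by simp)
                (by intro x hx; simp at hx; push_cast; omega) (Or.inl rfl)]
              simp
        · rw [posFrom_lt team 0 h, if_neg ht0, posFrom_lt team 1 h, if_neg ht1]
          simp only [onePassB, if_neg ht0, if_neg ht1]
          rw [hc, ih (i + 1) p0 p1 (by omega)
            (by intro x hx; have := h0 x hx; push_cast; omega)
            (by intro x hx; have := h1 x hx; push_cast; omega) hor]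
    · rw [List.drop_eq_nil_of_le (by omega), posFrom_nil team 0 h, posFrom_nil team 1 h,
        List.append_nil, List.append_nil]
      rcases hor with rfl | rfl
      · rw [twoPtr_nil_left]; rfl
      · rw [twoPtr_nil_right]; rfl

-- the head of a nonempty dropWhile result falsifies the predicate
lemma dropWhile_cons_not {α : Type} (p : α → Bool) :
    ∀ (l : List α) (a : α) (l' : List α), l.dropWhile p = a :: l' → p a = false := by
  intro l
  induction l with
  | nil => intro a l' h; simp at h
  | cons b l ih =>
    intro a l' h
    by_cases hb : p b
    · rw [List.dropWhile_cons_of_pos hb] at h; exact ih a l' h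
    · rw [List.dropWhile_cons_of_neg hb] at h
      cases h; simpa using hb

-- for negative dist A never matches
lemma loopA_neg (team : List Int) (dist : Int) (hd : dist < 0) :
    ∀ (n i j : Nat), (team.length - i) + (team.length - j) ≤ n →
      catchLoopA team dist i j = 0 := by
  intro n
  induction n with
  | zero => intro i j hn; rw [catchLoopA, dif_neg (by omega)]
  | succ n ih =>
    intro i j hn
    by_cases h : i < team.length ∧ j < team.length
    · rw [catchLoopA, dif_pos h]
      split_ifs with h1 h2
      · exact ih (i + 1) j (by omega)
      · exact ih i (j + 1) (by omega)
      · simp only [not_or, not_lt] at h1 h2; omega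
    · rw [catchLoopA, dif_neg h]

-- for negative dist B never matches either
lemma onePass_neg (dist : Int) (hd : dist < 0) :
    ∀ (xs : List Int) (k : Int) (p0 p1 : List Int),
      (∀ x ∈ p0, x < k) → (∀ x ∈ p1, x < k) → onePassB dist xs k p0 p1 = 0 := by
  intro xs
  induction xs with
  | nil => intro k p0 p1 _ _; rfl
  | cons t rest ih =>
    intro k p0 p1 h0 h1
    by_cases ht0 : t = 0
    · simp only [onePassB, if_pos ht0]
      cases hdw : p1.dropWhile (fun o => decide (o + dist < k)) with
      | cons o q =>
        exfalso
        have hmem : o ∈ p1 := (List.dropWhile_sublist _).subset (hdw ▸ List.mem_cons_self)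
        have := dropWhile_cons_not _ p1 o q hdw
        simp at this
        have := h1 o hmem
        omega
      | nil =>
        exact ih (k + 1) (p0 ++ [k]) []
          (by intro x hx; rcases List.mem_append.mp hx with hx | hx
              · have := h0 x hx; omega
              · simp at hx; omega)
          (by simp)
    · by_cases ht1 : t = 1
      · simp only [onePassB, if_neg ht0, if_pos ht1]
        cases hdw : p0.dropWhile (fun z => decide (z + dist < k)) with
        | cons z q =>
          exfalso
          have hmem : z ∈ p0 := (List.dropWhile_sublist _).subset (hdw ▸ List.mem_cons_self)
          have := dropWhile_cons_not _ p0 z q hdw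
          simp at this
          have := h0 z hmem
          omega
        | nil =>
          exact ih (k + 1) [] (p1 ++ [k]) (by simp)
            (by intro x hx; rcases List.mem_append.mp hx with hx | hx
                · have := h1 x hx; omega
                · simp at hx; omega)
      · simp only [onePassB, if_neg ht0, if_neg ht1]
        exact ih (k + 1) p0 p1
          (by intro x hx; have := h0 x hx; omega)
          (by intro x hx; have := h1 x hx; omega)

-- ===== VERDICT (by name: the statement is the Claim_ definition above) =====
theorem catchMaximumAmountofPeople_spec : Claim_equal_catchMaximumAmountofPeople := by
  intro team dist _
  show catchMaximumAmountofPeople team dist = catchMaximumAmountofPeople_alt team dist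
  unfold catchMaximumAmountofPeople catchMaximumAmountofPeople_alt
  by_cases hd : 0 ≤ dist
  · have hB := onePass_eq team dist hd team.length 0 [] [] (by omega)
      (by simp) (by simp) (Or.inl rfl)
    simp only [List.drop_zero, Nat.cast_zero, List.nil_append] at hB
    rw [hB, main_lemma team dist (team.length + team.length) 0 0 (by omega)]
  · have hd' : dist < 0 := by omega
    rw [loopA_neg team dist hd' (team.length + team.length) 0 0 (by omega),
      onePass_neg dist hd' team 0 [] [] (by simp) (by simp)]
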